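-- pv_equiv track=rewrite | github.com/baealex/baealex | Algorithm/acmicpc.net/16435-스네이크버드.py | maximun_snake_length
-- ===== SOURCE A (Python) =====
-- def maximun_snake_length(snake_length, hs):
--     hs.sort()
--     index = 0
--     while True:
--         if index < len(hs) and hs[index] <= snake_length:
--             index += 1
--         else:
--             snake_length += index
--             hs = hs[index:]
--             if index == 0:
--                 return snake_length
--             index = 0
-- ===== SOURCE B (Python) =====
-- def maximun_snake_length(snake_length, hs):
--     for h in sorted(hs):
--         if h > snake_length:
--             break
--         snake_length += 1
--     return snake_length
-- ===== Notes on version B (the rewrite author's own statement) =====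
-- stated objective: simpler
-- what changed: Replaces A's restarting batch-scan while-loop (re-slicing the list and rescanning after every batch of eaten fruits) with a single linear pass over the sorted list that grows the length by one per eaten fruit and stops at the first too-tall fruit.
import Mathlib
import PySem

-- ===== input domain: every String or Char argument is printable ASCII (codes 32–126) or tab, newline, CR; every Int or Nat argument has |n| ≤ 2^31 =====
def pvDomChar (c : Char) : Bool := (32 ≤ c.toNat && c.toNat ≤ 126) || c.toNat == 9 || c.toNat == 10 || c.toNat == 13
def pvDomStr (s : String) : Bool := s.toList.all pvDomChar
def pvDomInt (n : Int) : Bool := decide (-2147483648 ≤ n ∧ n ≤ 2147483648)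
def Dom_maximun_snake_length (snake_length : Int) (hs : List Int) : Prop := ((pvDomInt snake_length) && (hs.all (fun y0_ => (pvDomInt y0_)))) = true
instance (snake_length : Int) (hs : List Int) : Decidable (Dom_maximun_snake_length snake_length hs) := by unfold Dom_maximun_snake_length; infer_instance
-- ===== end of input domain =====

-- B replaces A's restarting batch-scan loop with one simpler linear pass over the sorted
-- list. Equivalence is about the RETURN value only: A sorts `hs` in place, B does not mutate it.

-- ===== PORT A =====
-- A's `while True` loop; the `index ≤ hs.length` hypothesis is a totality guard
-- (Python's `index` only increments under `index < len(hs)`).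
-- `hs.getD index 0` is exact for Python's `hs[index]`: it is only read under `index < len(hs)`.
def pvLoopA (snake : Int) (hs : List Int) (index : Nat) (hle : index ≤ hs.length) : Int :=
  if h : index < hs.length ∧ hs.getD index 0 ≤ snake then
    pvLoopA snake hs (index + 1) h.1
  else
    -- snake_length += index; hs = hs[index:]; if index == 0: return; index = 0
    if index = 0 then snake + index
    else pvLoopA (snake + index) (PySem.List.slice hs (some (index : Int)) none) 0 (Nat.zero_le _)
termination_by 2 * hs.length - index
decreasing_by
  · omega
  · have hlen : (PySem.List.slice hs (some (index : Int)) none).length = hs.length - index := by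
      rw [PySem.List.slice_from_natCast]; simp
    omega

def maximun_snake_length (snake_length : Int) (hs : List Int) : Int :=
  pvLoopA snake_length (PySem.List.sorted hs (fun x => x) false) 0 (Nat.zero_le _)

-- ===== PORT B =====
def pvLoopB : Int → List Int → Int
  | s, [] => s
  | s, h :: t => if h > s then s else pvLoopB (s + 1) t

def maximun_snake_length_alt (snake_length : Int) (hs : List Int) : Int :=
  pvLoopB snake_length (PySem.List.sorted hs (fun x => x) false)

-- ===== PRECONDITION & SPEC =====
def Spec_maximun_snake_length (snake_length : Int) (hs : List Int) (out : Int) : Prop := out = maximun_snake_length_alt snake_length hs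
instance (snake_length : Int) (hs : List Int) (out : Int) : Decidable (Spec_maximun_snake_length snake_length hs out) := by unfold Spec_maximun_snake_length; infer_instance

-- ===== CLAIM (what is proved, stated in full; the proofs are below) =====
def Claim_equal_maximun_snake_length : Prop := ∀ (snake_length : Int) (hs : List Int), Dom_maximun_snake_length snake_length hs → Spec_maximun_snake_length snake_length hs (maximun_snake_length snake_length hs)

-- ===== LEMMAS AND PROOFS =====
theorem pvLoopA_eq_pvLoopB (snake : Int) (hs : List Int) (index : Nat) (hle : index ≤ hs.length) :
    pvLoopA snake hs index hle = pvLoopB (snake + index) (hs.drop index) := by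
  fun_induction pvLoopA snake hs index hle with
  | case1 snake hs index hle h ih =>
    obtain ⟨hlt, hle'⟩ := h
    rw [ih, List.drop_eq_getElem_cons hlt, pvLoopB]
    have hgd : hs.getD index 0 = hs[index] := List.getD_eq_getElem hs 0 hlt
    have : ¬ hs[index] > snake + index := by
      have : (0 : Int) ≤ (index : Int) := Int.natCast_nonneg index
      omega
    simp only [this, if_false]
    push_cast; ring_nf
  | case2 snake hs hle h =>
    cases hs with
    | nil => simp [pvLoopB]
    | cons a t =>
      have : ¬ a ≤ snake := by
        intro hc; exact h ⟨by simp, by simpa using hc⟩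
      simp [pvLoopB, this]
  | case3 snake hs index hle h h0 ih =>
    rw [ih]
    rw [PySem.List.slice_from_natCast] at *
    simp

theorem maximun_snake_length_spec : Claim_equal_maximun_snake_length := by
  intro s hs _
  unfold Spec_maximun_snake_length maximun_snake_length maximun_snake_length_alt
  rw [pvLoopA_eq_pvLoopB]
  simp
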